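-- pv_equiv track=rewrite | github.com/kokok22/Algorithm | Programmers/Level_1/Screet Map.py | solution
-- ===== SOURCE A (Python) =====
-- def solution(n, arr1, arr2):
--     answer = []
--
--     for ar1, ar2 in zip(arr1, arr2):
--         temp = str(bin(ar1 | ar2))[2:]
--         temp = " " * (n - len(temp)) + temp
--         temp = temp.replace("1","#").replace("0"," ")
--         answer.append(temp)
--
--     return answer
-- ===== SOURCE B (Python) =====
-- def solution(n, arr1, arr2):
--     answer = []
--     for a, b in zip(arr1, arr2):
--         m = a | b
--         w = max(n, m.bit_length(), 1)
--         answer.append(''.join('#' if m >> (w - 1 - j) & 1 else ' '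
--                               for j in range(w)))
--     return answer
-- ===== Notes on version B (the rewrite author's own statement) =====
-- stated objective: simpler
-- what changed: Each row is built in one pass by testing individual bits of ar1|ar2 over explicit column positions of width max(n, bit_length, 1), instead of A's bin()-string slice, space-padding and two replace passes; Pre_ restricts to the task's natural domain of nonnegative bitmask rows (a negative OR value is outside the secret-map encoding, and neither program's string there is specified).
-- outside the precondition, e.g. on solution(2, [-1], [0]): A returns ['b#'], B returns ['##']
import Mathlib
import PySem

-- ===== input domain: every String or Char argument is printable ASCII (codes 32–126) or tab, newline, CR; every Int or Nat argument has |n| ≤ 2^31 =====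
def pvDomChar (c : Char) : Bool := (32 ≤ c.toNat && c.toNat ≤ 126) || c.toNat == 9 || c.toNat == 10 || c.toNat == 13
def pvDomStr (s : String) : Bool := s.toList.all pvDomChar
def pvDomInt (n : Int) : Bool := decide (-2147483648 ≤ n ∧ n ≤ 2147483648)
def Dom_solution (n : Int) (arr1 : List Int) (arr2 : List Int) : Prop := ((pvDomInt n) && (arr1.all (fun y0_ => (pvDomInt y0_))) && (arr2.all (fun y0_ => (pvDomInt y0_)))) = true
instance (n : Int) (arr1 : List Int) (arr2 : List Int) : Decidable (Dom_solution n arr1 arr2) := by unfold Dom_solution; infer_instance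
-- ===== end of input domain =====

-- B builds each row in one pass by per-bit tests over column positions of width
-- max(n, bit_length, 1) instead of A's bin()-slice + space-pad + two replace passes;
-- same cost, simpler row construction.


-- ===== PORT A =====
-- binary digits of a positive Nat, most significant first (empty for 0)
def natBin (v : Nat) : List Char :=
  if v = 0 then [] else natBin (v / 2) ++ [if v % 2 = 1 then '1' else '0']
  termination_by v
  decreasing_by omega

-- the digit part of Python's bin(): bin(0) = '0b0'
def pyDigits (v : Nat) : List Char := if v = 0 then ['0'] else natBin v

-- the characters of Python's str(bin(v)) (exact, including the '-0b' prefix)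
def pyBinChars (v : Int) : List Char :=
  if v < 0 then '-' :: '0' :: 'b' :: pyDigits (-v).toNat
  else '0' :: 'b' :: pyDigits v.toNat

-- one loop body of A: bin/slice, left-pad with spaces, replace('1','#'), replace('0',' ')
def rowA (n : Int) (v : Int) : String :=
  let t0 := (pyBinChars v).drop 2
  let t1 := List.replicate (n - (t0.length : Int)).toNat ' ' ++ t0
  let t2 := t1.map (fun c => if c = '1' then '#' else c)
  let t3 := t2.map (fun c => if c = '0' then ' ' else c)
  String.mk t3

def solution (n : Int) (arr1 : List Int) (arr2 : List Int) : List String :=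
  (arr1.zip arr2).foldl (fun answer p => answer ++ [rowA n (Int.lor p.1 p.2)]) []

-- ===== PORT B =====
-- Python's int.bit_length (on the absolute value, as in Python)
def bitLen (v : Nat) : Nat :=
  if v = 0 then 0 else bitLen (v / 2) + 1
  termination_by v
  decreasing_by omega

def pyBitLength (v : Int) : Nat := bitLen v.natAbs

-- one row of B: width w = max(n, bit_length, 1); per-bit columns from the high end
def rowB (n : Int) (v : Int) : String :=
  let w := (max (max n (pyBitLength v : Int)) 1).toNat
  String.mk ((List.range w).map
    (fun j => if Int.land (v >>> ((w - 1 - j : Nat) : Int)) 1 = 1 then '#' else ' '))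

def solution_alt (n : Int) (arr1 : List Int) (arr2 : List Int) : List String :=
  (arr1.zip arr2).map (fun p => rowB n (Int.lor p.1 p.2))

-- ===== PRECONDITION & SPEC =====
-- Pre_ restricts to the task's natural domain: every OR-combined row value is
-- nonnegative (the rows are bitmasks); on a negative OR value A still returns a
-- string, but it is an accident of slicing '-0b…' and neither value is specified.
def Pre_solution (n : Int) (arr1 : List Int) (arr2 : List Int) : Prop :=
  ∀ p ∈ arr1.zip arr2, 0 ≤ Int.lor p.1 p.2
instance (n : Int) (arr1 : List Int) (arr2 : List Int) : Decidable (Pre_solution n arr1 arr2) := by unfold Pre_solution; infer_instance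
def pvWitness_solution : Int × List Int × List Int := (5, [9, 20], [30, 1])

def Spec_solution (n : Int) (arr1 : List Int) (arr2 : List Int) (out : List String) : Prop := out = solution_alt n arr1 arr2
instance (n : Int) (arr1 : List Int) (arr2 : List Int) (out : List String) : Decidable (Spec_solution n arr1 arr2 out) := by unfold Spec_solution; infer_instance

-- ===== CLAIM (what is proved, stated in full; the proofs are below) =====
def Claim_equal_solution : Prop := ∀ (n : Int) (arr1 : List Int) (arr2 : List Int), Dom_solution n arr1 arr2 → Pre_solution n arr1 arr2 → Spec_solution n arr1 arr2 (solution n arr1 arr2)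

-- ===== LEMMAS AND PROOFS =====

lemma natBin_length (m : Nat) : (natBin m).length = bitLen m := by
  induction m using Nat.strong_induction_on with
  | _ m ih =>
    rw [natBin, bitLen]
    by_cases h : m = 0
    · simp [h]
    · simp only [h, if_false, List.length_append, List.length_cons, List.length_nil]
      rw [ih (m / 2) (by omega)]

lemma bitLen_lt (m : Nat) : m < 2 ^ bitLen m := by
  induction m using Nat.strong_induction_on with
  | _ m ih =>
    rw [bitLen]
    by_cases h : m = 0
    · simp [h]
    · rw [if_neg h, pow_succ]
      have := ih (m / 2) (by omega)
      omega

-- the replaced digits of a positive m, reversed, are its bits bottom-up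
lemma natBin_replaced_reverse (m : Nat) (hm : 0 < m) :
    (((natBin m).map (fun c => if c = '1' then '#' else c)).map
        (fun c => if c = '0' then ' ' else c)).reverse
      = (List.range (bitLen m)).map (fun j => if (m / 2 ^ j) % 2 = 1 then '#' else ' ') := by
  induction m using Nat.strong_induction_on with
  | _ m ih =>
    rw [natBin, bitLen]
    have h : ¬ m = 0 := by omega
    simp only [h, if_false]
    rw [List.map_append, List.map_append, List.reverse_append]
    have hrange : List.range (bitLen (m / 2) + 1)
        = 0 :: (List.range (bitLen (m / 2))).map (· + 1) := by
      rw [List.range_succ_eq_map]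
    rw [hrange]
    simp only [List.map_cons, List.map_map, List.map_nil, List.reverse_cons,
      List.reverse_nil, List.nil_append, List.cons_append]
    congr 1
    · by_cases hb : m % 2 = 1 <;> simp [hb]
    · by_cases h2 : m / 2 = 0
      · rw [natBin, if_pos h2, bitLen, if_pos h2]
        simp
      · rw [← List.map_map, ih (m / 2) (by omega) (by omega)]
        apply List.map_congr_left
        intro j hj
        simp only [Function.comp_apply]
        have hdd : m / 2 ^ (j + 1) = m / 2 / 2 ^ j := by
          rw [Nat.pow_succ, Nat.mul_comm, ← Nat.div_div_eq_div_mul]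
        rw [hdd]

lemma pyDigits_length (m : Nat) : (pyDigits m).length = max (bitLen m) 1 := by
  rw [pyDigits]
  by_cases h : m = 0
  · simp [h, bitLen]
  · rw [if_neg h, natBin_length]
    have h1 : 0 < bitLen m := by rw [bitLen]; simp [h]
    omega

lemma pyDigits_replaced_reverse (m : Nat) :
    (((pyDigits m).map (fun c => if c = '1' then '#' else c)).map
        (fun c => if c = '0' then ' ' else c)).reverse
      = (List.range (max (bitLen m) 1)).map
          (fun j => if (m / 2 ^ j) % 2 = 1 then '#' else ' ') := by
  rw [pyDigits]
  by_cases h : m = 0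
  · subst h; simp [bitLen, List.range_succ]
  · rw [if_neg h]
    have h1 : 0 < bitLen m := by rw [bitLen]; simp [h]
    rw [natBin_replaced_reverse m (by omega)]
    have hmx : max (bitLen m) 1 = bitLen m := by omega
    rw [hmx]

lemma map_range_reverse {α : Type} (L : Nat) (g : Nat → α) :
    ((List.range L).map g).reverse = (List.range L).map (fun j => g (L - 1 - j)) := by
  apply List.ext_getElem
  · simp
  · intro i h1 h2
    simp only [List.length_reverse, List.length_map, List.length_range] at h1
    rw [List.getElem_reverse]
    simp

-- the replaced digit block of m equals the high-to-low per-bit columns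
lemma digits_row (m : Nat) :
    ((pyDigits m).map (fun c => if c = '1' then '#' else c)).map
        (fun c => if c = '0' then ' ' else c)
      = (List.range (max (bitLen m) 1)).map
          (fun j => if (m >>> (max (bitLen m) 1 - 1 - j)) &&& 1 = 1 then '#' else ' ') := by
  have h := pyDigits_replaced_reverse m
  have h2 : ((pyDigits m).map (fun c => if c = '1' then '#' else c)).map
      (fun c => if c = '0' then ' ' else c)
      = ((List.range (max (bitLen m) 1)).map
          (fun j => if (m / 2 ^ j) % 2 = 1 then '#' else ' ')).reverse := by
    rw [← h, List.reverse_reverse]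
  rw [h2, map_range_reverse]
  apply List.map_congr_left
  intro j hj
  rw [Nat.and_one_is_mod, Nat.shiftRight_eq_div_pow]

-- high bits of m vanish: shift by at least bitLen m gives 0
lemma shiftRight_ge_bitLen (m k : Nat) (hk : bitLen m ≤ k) : m >>> k = 0 := by
  rw [Nat.shiftRight_eq_div_pow]
  have h1 := bitLen_lt m
  have h2 : (2:Nat) ^ bitLen m ≤ 2 ^ k := Nat.pow_le_pow_right (by omega) hk
  exact Nat.div_eq_of_lt (by omega)

-- B's column map over width P+L splits into P leading spaces and the digit block
lemma rowB_split (m P L : Nat) (hL : bitLen m ≤ L) :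
    (List.range (P + L)).map
        (fun j => if Int.land ((m : Int) >>> ((P + L - 1 - j : Nat) : Int)) 1 = 1 then '#' else ' ')
      = List.replicate P ' '
        ++ (List.range L).map (fun j => if (m >>> (L - 1 - j)) &&& 1 = 1 then '#' else ' ') := by
  rw [List.range_add, List.map_append, List.map_map]
  congr 1
  · -- high columns are all spaces
    have hsp : ∀ j ∈ List.range P,
        (if Int.land ((m : Int) >>> ((P + L - 1 - j : Nat) : Int)) 1 = 1 then '#' else ' ') = ' ' := by
      intro j hj
      rw [List.mem_range] at hj
      rw [Int.shiftRight_natCast]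
      have hz : m >>> (P + L - 1 - j) = 0 :=
        shiftRight_ge_bitLen m _ (by omega)
      rw [hz]
      simp [Int.land]
    rw [List.map_congr_left hsp]
    simp [List.map_const']
  · -- low columns are the digit block
    apply List.map_congr_left
    intro j hj
    rw [List.mem_range] at hj
    simp only [Function.comp_apply]
    rw [Int.shiftRight_natCast]
    have he : P + L - 1 - (P + j) = L - 1 - j := by omega
    rw [he]
    have hc : Int.land ((m >>> (L - 1 - j) : Nat) : Int) 1 = ((m >>> (L - 1 - j) &&& 1 : Nat) : Int) := rfl
    rw [hc]
    by_cases hb : m >>> (L - 1 - j) &&& 1 = 1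
    · rw [if_pos (by exact_mod_cast hb), if_pos hb]
    · rw [if_neg (by exact_mod_cast hb), if_neg hb]

-- the central per-row fact, for nonnegative row values
lemma row_eq (n : Int) (m : Nat) : rowA n (m : Int) = rowB n (m : Int) := by
  simp only [rowA, rowB, pyBinChars]
  have hnn : ¬ ((m : Int) < 0) := by omega
  rw [if_neg hnn]
  apply congrArg String.mk
  simp only [List.drop_succ_cons, List.drop_zero, List.map_append, List.map_replicate,
    Int.toNat_natCast, Int.natAbs_natCast, pyBitLength]
  rw [pyDigits_length, digits_row]
  set L := max (bitLen m) 1 with hL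
  have hL1 : 1 ≤ L := by omega
  set P := (n - (L : Int)).toNat with hP
  have hw : (max (max n ((bitLen m : Nat) : Int)) 1).toNat = P + L := by omega
  simp only [hw]
  rw [rowB_split m P L (by omega)]
  rfl

lemma foldl_append_rows {α β : Type} (f : α → β) (l : List α) (acc : List β) :
    l.foldl (fun answer x => answer ++ [f x]) acc = acc ++ l.map f := by
  induction l generalizing acc with
  | nil => simp
  | cons x xs ih => simp [List.foldl_cons, ih]

-- ===== VERDICT (by name: the statement is the Claim_ definition above) =====
theorem solution_spec : Claim_equal_solution := by
  intro n arr1 arr2 _hdom hpre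
  unfold Spec_solution solution solution_alt
  rw [foldl_append_rows]
  simp only [List.nil_append]
  apply List.map_congr_left
  intro p hp
  have h0 := hpre p hp
  have hm : Int.lor p.1 p.2 = ((Int.lor p.1 p.2).toNat : Int) := by omega
  rw [hm]
  exact row_eq n (Int.lor p.1 p.2).toNat
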